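-- pv_equiv track=rewrite | github.com/pipimamaoyuan/One-dimensional-Chinese-checkers | dfs.py | dfs
-- ===== SOURCE A (Python) =====
-- def get_neighbors(state):
--     """
--     根据当前状态 state，生成所有合法的下一步状态。
--     红棋只能向右移动，绿棋只能向左移动，
--     棋子可以一步移动或跳跃移动（跳跃时隔一个棋子）。
--     """
--     neighbors = []
--     state_list = list(state)
--     n = len(state_list)
--
--     for i, piece in enumerate(state_list):
--         if piece == 'R':
--             # 红棋只能向右移动
--             # 一步移动：右侧紧邻位置为空
--             if i + 1 < n and state_list[i+1] == '_':
--                 new_state = state_list.copy()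
--                 new_state[i] = '_'
--                 new_state[i+1] = 'R'
--                 neighbors.append(''.join(new_state))
--             # 跳跃移动：右侧紧邻位置有棋子，且下一个位置为空
--             if i + 2 < n and state_list[i+1] != '_' and state_list[i+2] == '_':
--                 new_state = state_list.copy()
--                 new_state[i] = '_'
--                 new_state[i+2] = 'R'
--                 neighbors.append(''.join(new_state))
--
--         elif piece == 'G':
--             # 绿棋只能向左移动
--             # 一步移动：左侧紧邻位置为空
--             if i - 1 >= 0 and state_list[i-1] == '_':
--                 new_state = state_list.copy()
--                 new_state[i] = '_'
--                 new_state[i-1] = 'G'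
--                 neighbors.append(''.join(new_state))
--             # 跳跃移动：左侧紧邻位置有棋子，且再左一个位置为空
--             if i - 2 >= 0 and state_list[i-1] != '_' and state_list[i-2] == '_':
--                 new_state = state_list.copy()
--                 new_state[i] = '_'
--                 new_state[i-2] = 'G'
--                 neighbors.append(''.join(new_state))
--
--     return neighbors
--
-- def dfs(state, goal, path, visited):
--     """
--     利用深度优先搜索递归查找从 state 到 goal 的路径。
--     参数：
--       - state: 当前状态（字符串形式）
--       - goal: 目标状态
--       - path: 从初始状态到当前状态的路径（状态列表）
--       - visited: 记录已经访问过的状态，防止重复搜索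
--     如果找到解，则返回完整路径；否则返回 None。
--     """
--     if state == goal:
--         return path
--
--     for next_state in get_neighbors(state):
--         if next_state not in visited:
--             visited.add(next_state)
--             result = dfs(next_state, goal, path + [next_state], visited)
--             if result is not None:
--                 return result
--     return None
-- ===== SOURCE B (Python) =====
-- def get_neighbors(state):
--     neighbors = []
--     state_list = list(state)
--     n = len(state_list)
--     for i, piece in enumerate(state_list):
--         if piece == 'R':
--             if i + 1 < n and state_list[i+1] == '_':
--                 new_state = state_list.copy()
--                 new_state[i] = '_'
--                 new_state[i+1] = 'R'
--                 neighbors.append(''.join(new_state))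
--             if i + 2 < n and state_list[i+1] != '_' and state_list[i+2] == '_':
--                 new_state = state_list.copy()
--                 new_state[i] = '_'
--                 new_state[i+2] = 'R'
--                 neighbors.append(''.join(new_state))
--         elif piece == 'G':
--             if i - 1 >= 0 and state_list[i-1] == '_':
--                 new_state = state_list.copy()
--                 new_state[i] = '_'
--                 new_state[i-1] = 'G'
--                 neighbors.append(''.join(new_state))
--             if i - 2 >= 0 and state_list[i-1] != '_' and state_list[i-2] == '_':
--                 new_state = state_list.copy()
--                 new_state[i] = '_'
--                 new_state[i-2] = 'G'
--                 neighbors.append(''.join(new_state))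
--     return neighbors
--
--
-- def dfs(state, goal, path, visited):
--     # Iterative DFS with an explicit stack of (path, remaining-neighbors) frames;
--     # same preorder exploration and same visited mutation as the recursive version.
--     if state == goal:
--         return path
--     stack = [(path, get_neighbors(state))]
--     while stack:
--         p, rem = stack[-1]
--         if not rem:
--             stack.pop()
--             continue
--         n = rem.pop(0)
--         if n in visited:
--             continue
--         visited.add(n)
--         if n == goal:
--             return p + [n]
--         stack.append((p + [n], get_neighbors(n)))
--     return None
-- ===== Notes on version B (the rewrite author's own statement) =====
-- stated objective: alternative
-- what changed: The recursive DFS is replaced by an iterative depth-first search over an explicit stack of (path, remaining-neighbors) frames, with the same discovery-time visited marking and preorder path choice; get_neighbors is kept unchanged.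
import Mathlib
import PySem

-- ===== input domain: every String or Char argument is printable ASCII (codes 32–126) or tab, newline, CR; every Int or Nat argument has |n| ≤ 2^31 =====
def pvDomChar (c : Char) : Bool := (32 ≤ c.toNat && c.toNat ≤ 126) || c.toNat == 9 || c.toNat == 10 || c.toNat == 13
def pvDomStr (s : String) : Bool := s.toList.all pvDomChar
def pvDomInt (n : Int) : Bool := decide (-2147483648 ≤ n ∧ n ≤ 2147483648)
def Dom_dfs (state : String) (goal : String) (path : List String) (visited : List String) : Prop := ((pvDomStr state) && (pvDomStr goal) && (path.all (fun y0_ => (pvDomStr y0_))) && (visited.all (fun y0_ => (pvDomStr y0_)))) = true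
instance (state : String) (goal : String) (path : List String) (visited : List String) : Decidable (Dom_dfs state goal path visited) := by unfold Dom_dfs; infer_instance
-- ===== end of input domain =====

-- B rewrites the recursive DFS as an iterative explicit-stack DFS (same preorder, same
-- visited-at-discovery marking); equivalence proved for the RETURN value — both Pythons
-- mutate the caller's `visited` set identically, which the theorems do not talk about.

-- Shared helper: literal port of get_neighbors (kept unchanged in B, as in Source B).
def getNeighbors (state : String) : List String :=
  let sl := state.toList
  let n := sl.length
  sl.zipIdx.foldl (fun acc pi =>
    let piece := pi.1
    let i := pi.2
    acc ++
      (if piece = 'R' then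
        (if i + 1 < n ∧ sl.getD (i+1) ' ' = '_' then
          [String.ofList ((sl.set i '_').set (i+1) 'R')] else []) ++
        (if i + 2 < n ∧ sl.getD (i+1) ' ' ≠ '_' ∧ sl.getD (i+2) ' ' = '_' then
          [String.ofList ((sl.set i '_').set (i+2) 'R')] else [])
      else if piece = 'G' then
        (if 1 ≤ i ∧ sl.getD (i-1) ' ' = '_' then
          [String.ofList ((sl.set i '_').set (i-1) 'G')] else []) ++
        (if 2 ≤ i ∧ sl.getD (i-1) ' ' ≠ '_' ∧ sl.getD (i-2) ' ' = '_' then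
          [String.ofList ((sl.set i '_').set (i-2) 'G')] else [])
      else [])) []

-- Termination bookkeeping (proof-level only; erased at runtime): every state ever visited is a
-- string of the fixed length L over the fixed alphabet Sig, so the number of such strings not yet
-- in `visited` is a decreasing measure.
def StOk (Sig : List Char) (L : Nat) (s : String) : Prop :=
  s.toList.length = L ∧ ∀ c ∈ s.toList, c ∈ Sig

def allLists (Sig : List Char) : Nat → List (List Char)
  | 0 => [[]]
  | k+1 => Sig.flatMap (fun c => (allLists Sig k).map (c :: ·))

def allStrs (Sig : List Char) (L : Nat) : List String := (allLists Sig L).map String.ofList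

def free (Sig : List Char) (L : Nat) (visited : List String) : Nat :=
  ((allStrs Sig L).filter (fun s => !(visited.contains s))).length

lemma mem_allLists {Sig : List Char} : ∀ {l : List Char} {L : Nat},
    l.length = L → (∀ c ∈ l, c ∈ Sig) → l ∈ allLists Sig L := by
  intro l
  induction l with
  | nil => intro L h _; subst h; simp [allLists]
  | cons c t ih =>
    intro L h hc
    subst h
    simp only [List.length_cons, allLists, List.mem_flatMap, List.mem_map]
    exact ⟨c, hc c (by simp), t, ih rfl (fun d hd => hc d (by simp [hd])), rfl⟩

lemma mem_allStrs {Sig : List Char} {L : Nat} {s : String} (h : StOk Sig L s) :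
    s ∈ allStrs Sig L := by
  have h1 : s.toList ∈ allLists Sig L := mem_allLists h.1 h.2
  simpa [allStrs] using ⟨s.toList, h1, by simp⟩

lemma filter_len_lt {α : Type} (l : List α) (p q : α → Bool)
    (himp : ∀ x, p x = true → q x = true) {a : α} (ha : a ∈ l)
    (hq : q a = true) (hp : p a = false) :
    (l.filter p).length < (l.filter q).length := by
  induction l with
  | nil => cases ha
  | cons b t ih =>
    have hle : (t.filter p).length ≤ (t.filter q).length := by
      rw [← List.countP_eq_length_filter, ← List.countP_eq_length_filter]
      exact List.countP_mono_left (fun x _ hx => himp x hx)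
    rcases List.mem_cons.mp ha with rfl | hat
    · simp only [List.filter_cons, hp, hq]
      simpa using Nat.lt_succ_of_le hle
    · have := ih hat
      by_cases hb : p b = true
      · simp only [List.filter_cons, hb, himp b hb]
        simpa using this
      · simp only [List.filter_cons, Bool.not_eq_true] at hb ⊢
        simp only [hb]
        by_cases hqb : q b = true <;> simp [hqb] <;> omega

lemma free_lt {Sig : List Char} {L : Nat} {visited : List String} {n : String}
    (hn : StOk Sig L n) (hnv : n ∉ visited) :
    free Sig L (visited ++ [n]) < free Sig L visited := by
  refine filter_len_lt (allStrs Sig L) _ _ ?_ (mem_allStrs hn) (by simpa using hnv) (by simp)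
  intro x hx
  simp only [Bool.not_eq_true', List.contains_eq_mem, decide_eq_false_iff_not,
    List.mem_append, List.mem_singleton] at hx ⊢
  exact fun h => hx (Or.inl h)

lemma free_le {Sig : List Char} {L : Nat} {v w : List String}
    (h : ∀ x ∈ v, x ∈ w) : free Sig L w ≤ free Sig L v := by
  unfold free
  rw [← List.countP_eq_length_filter, ← List.countP_eq_length_filter]
  refine List.countP_mono_left (fun x _ hx => ?_)
  simp only [Bool.not_eq_true', List.contains_eq_mem, decide_eq_false_iff_not] at hx ⊢
  exact fun hv => hx (h x hv)

lemma nbrs_ok {Sig : List Char} {L : Nat} {s : String}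
    (hSig : 'R' ∈ Sig ∧ 'G' ∈ Sig ∧ '_' ∈ Sig) (hs : StOk Sig L s) :
    ∀ t ∈ getNeighbors s, StOk Sig L t := by
  intro t ht
  obtain ⟨hlen, hc⟩ := hs
  have hset : ∀ (i j : Nat) (b b' : Char), b ∈ Sig → b' ∈ Sig →
      StOk Sig L (String.ofList ((s.toList.set i b).set j b')) := by
    intro i j b b' hb hb'
    constructor
    · simpa using hlen
    · intro c hcm
      simp only [String.toList_ofList] at hcm
      rcases List.mem_or_eq_of_mem_set hcm with hcm | rfl
      · rcases List.mem_or_eq_of_mem_set hcm with hcm | rfl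
        · exact hc c hcm
        · exact hb
      · exact hb'
  simp only [getNeighbors, PySem.List.foldl_append_eq_flatMap, List.nil_append,
    List.mem_flatMap] at ht
  obtain ⟨pi, _, ht⟩ := ht
  split_ifs at ht <;>
    simp only [List.mem_append, List.mem_cons, List.not_mem_nil, or_false,
      false_or] at ht <;>
    first
      | exact ht.elim
      | (rcases ht with rfl | rfl <;> (apply hset <;> tauto))

-- ===== PORT A =====
-- Recursive DFS, transliterated; `visited` (a Python set mutated in place) is threaded through
-- and returned together with the result (the subtype records only that it grew, for termination).
mutual
def dfsA (Sig : List Char) (L : Nat) (goal : String) (state : String) (path : List String)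
    (visited : List String) (hSig : 'R' ∈ Sig ∧ 'G' ∈ Sig ∧ '_' ∈ Sig) (hs : StOk Sig L state) :
    Option (List String) × {v : List String // ∀ x ∈ visited, x ∈ v} :=
  if state = goal then (some path, ⟨visited, fun _ h => h⟩)
  else loopA Sig L goal (getNeighbors state) path visited hSig (nbrs_ok hSig hs)
termination_by (free Sig L visited, 1, 0)
decreasing_by
  · apply Prod.Lex.right
    apply Prod.Lex.left
    omega

def loopA (Sig : List Char) (L : Nat) (goal : String) (ns : List String) (path : List String)
    (visited : List String) (hSig : 'R' ∈ Sig ∧ 'G' ∈ Sig ∧ '_' ∈ Sig)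
    (hns : ∀ t ∈ ns, StOk Sig L t) :
    Option (List String) × {v : List String // ∀ x ∈ visited, x ∈ v} :=
  match ns with
  | [] => (none, ⟨visited, fun _ h => h⟩)
  | n :: rest =>
    if hmem : n ∈ visited then
      loopA Sig L goal rest path visited hSig (fun t ht => hns t (List.mem_cons_of_mem n ht))
    else
      match dfsA Sig L goal n (path ++ [n]) (visited ++ [n]) hSig (hns n (List.mem_cons_self)) with
      | (some res, ⟨v', hv⟩) =>
        (some res, ⟨v', fun x hx => hv x (List.mem_append_left _ hx)⟩)
      | (none, ⟨v', hv⟩) =>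
        match loopA Sig L goal rest path v' hSig (fun t ht => hns t (List.mem_cons_of_mem n ht)) with
        | (o, ⟨w, hw⟩) => (o, ⟨w, fun x hx => hw x (hv x (List.mem_append_left _ hx))⟩)
termination_by (free Sig L visited, 0, ns.length)
decreasing_by
  · apply Prod.Lex.right'
    · exact Nat.le_refl _
    · apply Prod.Lex.right'
      · exact Nat.le_refl _
      · simp
  · apply Prod.Lex.left
    exact free_lt (hns n (List.mem_cons_self)) hmem
  · apply Prod.Lex.left
    have h1 : free Sig L v' ≤ free Sig L (visited ++ [n]) := free_le hv
    have h2 : free Sig L (visited ++ [n]) < free Sig L visited :=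
      free_lt (hns n (List.mem_cons_self)) hmem
    omega
end

def dfs (state : String) (goal : String) (path : List String) (visited : List String) :
    Option (List String) :=
  (dfsA (state.toList ++ ['R', 'G', '_']) state.toList.length goal state path visited
    ⟨by simp, by simp, by simp⟩
    ⟨rfl, fun c hc => List.mem_append_left _ hc⟩).1

-- ===== PORT B =====
-- Iterative DFS over an explicit stack of (path, remaining-neighbors) frames, as in Source B.
def StackOk (Sig : List Char) (L : Nat) (stack : List (List String × List String)) : Prop :=
  ∀ f ∈ stack, ∀ t ∈ f.2, StOk Sig L t

def runB (Sig : List Char) (L : Nat) (goal : String)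
    (stack : List (List String × List String)) (visited : List String)
    (hSig : 'R' ∈ Sig ∧ 'G' ∈ Sig ∧ '_' ∈ Sig) (hstk : StackOk Sig L stack) :
    Option (List String) :=
  match stack with
  | [] => none
  | (p, rem) :: rest =>
    match rem with
    | [] => runB Sig L goal rest visited hSig (fun f hf => hstk f (List.mem_cons_of_mem _ hf))
    | n :: rem' =>
      if hmem : n ∈ visited then
        runB Sig L goal ((p, rem') :: rest) visited hSig
          (by
            intro f hf t ht
            rcases List.mem_cons.mp hf with rfl | hf
            · exact hstk (p, n :: rem') (List.mem_cons_self) t (List.mem_cons_of_mem n ht)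
            · exact hstk f (List.mem_cons_of_mem _ hf) t ht)
      else
        let visited' := visited ++ [n]
        if n = goal then some (p ++ [n])
        else
          runB Sig L goal ((p ++ [n], getNeighbors n) :: (p, rem') :: rest) visited' hSig
            (by
              intro f hf t ht
              rcases List.mem_cons.mp hf with rfl | hf
              · exact nbrs_ok hSig (hstk (p, n :: rem') (List.mem_cons_self) n
                  (List.mem_cons_self)) t ht
              · rcases List.mem_cons.mp hf with rfl | hf
                · exact hstk (p, n :: rem') (List.mem_cons_self) t (List.mem_cons_of_mem n ht)
                · exact hstk f (List.mem_cons_of_mem _ hf) t ht)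
termination_by (free Sig L visited, (stack.map (fun f => f.2.length + 1)).sum)
decreasing_by
  · apply Prod.Lex.right'
    · exact Nat.le_refl _
    · simp
  · apply Prod.Lex.right'
    · exact Nat.le_refl _
    · simp
  · apply Prod.Lex.left
    exact free_lt (hstk (p, n :: rem') (List.mem_cons_self) n (List.mem_cons_self)) hmem

def dfs_alt (state : String) (goal : String) (path : List String) (visited : List String) :
    Option (List String) :=
  if state = goal then some path
  else
    runB (state.toList ++ ['R', 'G', '_']) state.toList.length goal
      [(path, getNeighbors state)] visited
      ⟨by simp, by simp, by simp⟩
      (by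
        intro f hf t ht
        rcases List.mem_cons.mp hf with rfl | hf
        · exact nbrs_ok ⟨by simp, by simp, by simp⟩
            ⟨rfl, fun c hc => List.mem_append_left _ hc⟩ t ht
        · cases hf)

-- ===== PRECONDITION & SPEC =====
def Spec_dfs (state : String) (goal : String) (path : List String) (visited : List String) (out : Option (List String)) : Prop := out = dfs_alt state goal path visited
instance (state : String) (goal : String) (path : List String) (visited : List String) (out : Option (List String)) : Decidable (Spec_dfs state goal path visited out) := by unfold Spec_dfs; infer_instance

-- ===== CLAIM (what is proved, stated in full; the proofs are below) =====
def Claim_equal_dfs : Prop := ∀ (state : String) (goal : String) (path : List String) (visited : List String), Dom_dfs state goal path visited → Spec_dfs state goal path visited (dfs state goal path visited)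

-- ===== LEMMAS AND PROOFS =====

-- "One frame of the stack machine computes one dfsA call / one loopA pass, then continues
-- with the rest of the stack and the grown visited set" — the two joint induction motives.
def KeyD (Sig : List Char) (L : Nat) (goal : String) (hSig : 'R' ∈ Sig ∧ 'G' ∈ Sig ∧ '_' ∈ Sig)
    (state : String) (path visited : List String) (hs : StOk Sig L state) : Prop :=
  ∀ (rest : List (List String × List String))
    (H : StackOk Sig L ((path, getNeighbors state) :: rest)), state ≠ goal →
    runB Sig L goal ((path, getNeighbors state) :: rest) visited hSig H =
      (match (dfsA Sig L goal state path visited hSig hs).1 with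
        | some r => some r
        | none => runB Sig L goal rest (dfsA Sig L goal state path visited hSig hs).2.1 hSig
            (fun f hf => H f (List.mem_cons_of_mem _ hf)))

def KeyL (Sig : List Char) (L : Nat) (goal : String) (hSig : 'R' ∈ Sig ∧ 'G' ∈ Sig ∧ '_' ∈ Sig)
    (ns path visited : List String) (hns : ∀ t ∈ ns, StOk Sig L t) : Prop :=
  ∀ (rest : List (List String × List String)) (H : StackOk Sig L ((path, ns) :: rest)),
    runB Sig L goal ((path, ns) :: rest) visited hSig H =
      (match (loopA Sig L goal ns path visited hSig hns).1 with
        | some r => some r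
        | none => runB Sig L goal rest (loopA Sig L goal ns path visited hSig hns).2.1 hSig
            (fun f hf => H f (List.mem_cons_of_mem _ hf)))

lemma key (Sig : List Char) (L : Nat) (goal : String)
    (hSig : 'R' ∈ Sig ∧ 'G' ∈ Sig ∧ '_' ∈ Sig) :
    ∀ (ns path visited : List String) (hns : ∀ t ∈ ns, StOk Sig L t),
      KeyL Sig L goal hSig ns path visited hns := by
  refine loopA.induct Sig L goal hSig (KeyD Sig L goal hSig) (KeyL Sig L goal hSig)
    ?c1 ?c2 ?c3 ?c4 ?c5 ?c6
  case c1 =>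
    intro path visited hs rest H hne
    exact absurd rfl hne
  case c2 =>
    intro state path visited hs hne ih rest H hne'
    have h := ih rest H
    simp only [dfsA, if_neg hne']
    exact h
  case c3 =>
    intro path visited hns _ rest H
    simp only [runB, loopA]
  case c4 =>
    intro path visited n rem' hns hmem _ ih rest H
    simp only [runB, loopA, dif_pos hmem]
    exact ih rest _
  case c5 =>
    intro path visited n rem' hns hmem res v' hv heq _ ih1 rest H
    simp only [runB, loopA, dif_neg hmem]
    rw [heq]
    dsimp only
    by_cases hgoal : n = goal
    · have hres : path ++ [n] = res := by
        simp only [dfsA, if_pos hgoal, Prod.mk.injEq, Option.some.injEq] at heq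
        exact heq.1
      rw [if_pos hgoal, hres]
    · rw [if_neg hgoal]
      have h := ih1 ((path, rem') :: rest) (by
        intro f hf t ht
        rcases List.mem_cons.mp hf with rfl | hf
        · exact nbrs_ok hSig (hns n List.mem_cons_self) t ht
        · rcases List.mem_cons.mp hf with rfl | hf
          · exact hns t (List.mem_cons_of_mem n ht)
          · exact H f (List.mem_cons_of_mem _ hf) t ht) hgoal
      rw [heq] at h
      dsimp only at h
      exact h
  case c6 =>
    intro path visited n rem' hns hmem v' hv heq o w hw heq2 _ ih1 ih2 rest H
    have hgoal : n ≠ goal := by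
      intro h
      simp only [dfsA, if_pos h, Prod.mk.injEq] at heq
      exact absurd heq.1 (by simp)
    simp only [runB, loopA, dif_neg hmem]
    rw [heq]
    dsimp only
    rw [if_neg hgoal, heq2]
    dsimp only
    have h1 := ih1 ((path, rem') :: rest) (by
      intro f hf t ht
      rcases List.mem_cons.mp hf with rfl | hf
      · exact nbrs_ok hSig (hns n List.mem_cons_self) t ht
      · rcases List.mem_cons.mp hf with rfl | hf
        · exact hns t (List.mem_cons_of_mem n ht)
        · exact H f (List.mem_cons_of_mem _ hf) t ht) hgoal
    rw [heq] at h1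
    dsimp only at h1
    have h2 := ih2 rest (by
      intro f hf t ht
      rcases List.mem_cons.mp hf with rfl | hf
      · exact hns t (List.mem_cons_of_mem n ht)
      · exact H f (List.mem_cons_of_mem _ hf) t ht)
    rw [heq2] at h2
    dsimp only at h2
    refine h1.trans (h2.trans ?_)
    cases o <;> rfl

-- ===== VERDICT (by name: the statement is the Claim_ definition above) =====
theorem dfs_spec : Claim_equal_dfs := by
  intro st gl p v _
  show dfs st gl p v = dfs_alt st gl p v
  by_cases hg : st = gl
  · simp only [dfs, dfs_alt, dfsA, if_pos hg]
  · have hSig0 : 'R' ∈ st.toList ++ ['R', 'G', '_'] ∧ 'G' ∈ st.toList ++ ['R', 'G', '_'] ∧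
        '_' ∈ st.toList ++ ['R', 'G', '_'] := ⟨by simp, by simp, by simp⟩
    have hs0 : StOk (st.toList ++ ['R', 'G', '_']) st.toList.length st :=
      ⟨rfl, fun c hc => List.mem_append_left _ hc⟩
    have H0 : StackOk (st.toList ++ ['R', 'G', '_']) st.toList.length
        [(p, getNeighbors st)] := by
      intro f hf t ht
      rcases List.mem_cons.mp hf with rfl | hf
      · exact nbrs_ok hSig0 hs0 t ht
      · cases hf
    have hk := key (st.toList ++ ['R', 'G', '_']) st.toList.length gl hSig0
      (getNeighbors st) p v (nbrs_ok hSig0 hs0) [] H0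
    have e1 : dfs st gl p v =
        (loopA (st.toList ++ ['R', 'G', '_']) st.toList.length gl (getNeighbors st) p v
          hSig0 (nbrs_ok hSig0 hs0)).1 := by
      rw [dfs, dfsA, if_neg hg]
    have e2 : dfs_alt st gl p v =
        runB (st.toList ++ ['R', 'G', '_']) st.toList.length gl [(p, getNeighbors st)] v
          hSig0 H0 := by
      rw [dfs_alt, if_neg hg]
    rw [e1, e2, hk]
    rcases hres : (loopA (st.toList ++ ['R', 'G', '_']) st.toList.length gl (getNeighbors st)
        p v hSig0 (nbrs_ok hSig0 hs0)).1 with _ | r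
    · simp only [runB]
    · rfl
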